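-- pv_equiv track=rewrite | github.com/AbdelStark/parler | parler/e2e.py | build_pytest_args
-- ===== SOURCE A (Python) =====
-- from collections.abc import Sequence
--
-- def _has_explicit_target(args: Sequence[str]) -> bool:
--     return any(arg == "tests/e2e" or arg.endswith(".py") or "::" in arg for arg in args)
--
-- def build_pytest_args(extra_args: Sequence[str]) -> list[str]:
--     args = list(extra_args)
--     if not _has_explicit_target(args):
--         args.insert(0, "tests/e2e")
--     if "-m" not in args and not any(arg.startswith("--markexpr") for arg in args):
--         args.extend(["-m", "slow"])
--     if "-s" not in args and "--capture=no" not in args: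
--         args.append("-s")
--     if not any(arg in {"-q", "-v", "-vv", "-vvv"} for arg in args):
--         args.append("-v")
--     return args
-- ===== SOURCE B (Python) =====
-- def build_pytest_args(extra_args):
--     has_target = has_m = has_mark = has_s = has_cap = has_verb = False
--     for a in extra_args:
--         if a == "tests/e2e" or a.endswith(".py") or "::" in a:
--             has_target = True
--         if a == "-m":
--             has_m = True
--         if a.startswith("--markexpr"):
--             has_mark = True
--         if a == "-s":
--             has_s = True
--         if a == "--capture=no":
--             has_cap = True
--         if a in ("-q", "-v", "-vv", "-vvv"):
--             has_verb = True
--     out = ([] if has_target else ["tests/e2e"]) + list(extra_args)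
--     if not (has_m or has_mark):
--         out += ["-m", "slow"]
--     if not (has_s or has_cap):
--         out.append("-s")
--     if not has_verb:
--         out.append("-v")
--     return out
-- ===== Notes on version B (the rewrite author's own statement) =====
-- stated objective: alternative
-- what changed: B replaces A's four separate scans over the growing args list by one pass over extra_args that accumulates six boolean flags, then assembles the result from those flags.
import Mathlib
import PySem

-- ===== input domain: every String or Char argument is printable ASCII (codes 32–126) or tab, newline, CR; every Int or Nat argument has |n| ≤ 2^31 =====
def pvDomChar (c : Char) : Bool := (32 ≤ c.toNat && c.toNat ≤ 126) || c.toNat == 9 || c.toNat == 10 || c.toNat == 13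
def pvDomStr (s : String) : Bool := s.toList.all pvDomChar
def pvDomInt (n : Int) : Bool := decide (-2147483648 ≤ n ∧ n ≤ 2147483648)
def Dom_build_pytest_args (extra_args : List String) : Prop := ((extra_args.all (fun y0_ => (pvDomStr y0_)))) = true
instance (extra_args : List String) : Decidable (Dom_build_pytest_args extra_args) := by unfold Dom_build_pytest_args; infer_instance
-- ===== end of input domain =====

-- B replaces A's four repeated scans over the growing args list by one pass over
-- extra_args accumulating six boolean flags, then assembles the result from the flags.


-- ===== PORT A =====
def pvHasExplicitTarget (args : List String) : Bool :=
  args.any (fun arg => arg == "tests/e2e" || PySem.Str.endswith arg ".py" || PySem.Str.isIn "::" arg)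

def build_pytest_args (extra_args : List String) : List String :=
  let args := extra_args
  let args := if !(pvHasExplicitTarget args) then "tests/e2e" :: args else args
  let args := if !(args.any (fun a => a == "-m")) && !(args.any (fun a => PySem.Str.startswith a "--markexpr"))
              then args ++ ["-m", "slow"] else args
  let args := if !(args.any (fun a => a == "-s")) && !(args.any (fun a => a == "--capture=no"))
              then args ++ ["-s"] else args
  let args := if !(args.any (fun a => a == "-q" || a == "-v" || a == "-vv" || a == "-vvv"))
              then args ++ ["-v"] else args
  args

-- ===== PORT B =====
def pvFlagStep (f : Bool × Bool × Bool × Bool × Bool × Bool) (a : String) :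
    Bool × Bool × Bool × Bool × Bool × Bool :=
  (f.1 || (a == "tests/e2e" || PySem.Str.endswith a ".py" || PySem.Str.isIn "::" a),
   f.2.1 || a == "-m",
   f.2.2.1 || PySem.Str.startswith a "--markexpr",
   f.2.2.2.1 || a == "-s",
   f.2.2.2.2.1 || a == "--capture=no",
   f.2.2.2.2.2 || (a == "-q" || a == "-v" || a == "-vv" || a == "-vvv"))

def build_pytest_args_alt (extra_args : List String) : List String :=
  let f := extra_args.foldl pvFlagStep (false, false, false, false, false, false)
  let out := (if f.1 then ([] : List String) else ["tests/e2e"]) ++ extra_args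
  let out := if !(f.2.1 || f.2.2.1) then out ++ ["-m", "slow"] else out
  let out := if !(f.2.2.2.1 || f.2.2.2.2.1) then out ++ ["-s"] else out
  let out := if !f.2.2.2.2.2 then out ++ ["-v"] else out
  out

-- ===== PRECONDITION & SPEC =====
def Spec_build_pytest_args (extra_args : List String) (out : List String) : Prop := out = build_pytest_args_alt extra_args
instance (extra_args : List String) (out : List String) : Decidable (Spec_build_pytest_args extra_args out) := by unfold Spec_build_pytest_args; infer_instance

-- ===== CLAIM (what is proved, stated in full; the proofs are below) =====
def Claim_equal_build_pytest_args : Prop := ∀ (extra_args : List String), Dom_build_pytest_args extra_args → Spec_build_pytest_args extra_args (build_pytest_args extra_args)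

-- ===== LEMMAS AND PROOFS =====

-- the folded flag tuple is the tuple of the six `any`-scans
theorem pvFlags_eq (xs : List String) (t m mk s c v : Bool) :
    xs.foldl pvFlagStep (t, m, mk, s, c, v) =
      (t || xs.any (fun a => a == "tests/e2e" || PySem.Str.endswith a ".py" || PySem.Str.isIn "::" a),
       m || xs.any (fun a => a == "-m"),
       mk || xs.any (fun a => PySem.Str.startswith a "--markexpr"),
       s || xs.any (fun a => a == "-s"),
       c || xs.any (fun a => a == "--capture=no"),
       v || xs.any (fun a => a == "-q" || a == "-v" || a == "-vv" || a == "-vvv")) := by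
  induction xs generalizing t m mk s c v with
  | nil => simp
  | cons x xs ih =>
      simp only [List.foldl_cons, pvFlagStep, List.any_cons, ih]
      simp [Bool.or_assoc]

-- literal-string facts used to discard the constants A inserts from later scans
theorem pvLit1 : ((("tests/e2e" : String) == "-m") = false) ∧ ((("tests/e2e" : String) == "-s") = false) ∧
    ((("tests/e2e" : String) == "--capture=no") = false) ∧ ((("tests/e2e" : String) == "-q") = false) ∧
    ((("tests/e2e" : String) == "-v") = false) ∧ ((("tests/e2e" : String) == "-vv") = false) ∧
    ((("tests/e2e" : String) == "-vvv") = false) ∧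
    (PySem.Str.startswith "tests/e2e" "--markexpr" = false) ∧
    ((("-m" : String) == "-s") = false) ∧ ((("slow" : String) == "-s") = false) ∧
    ((("-m" : String) == "--capture=no") = false) ∧ ((("slow" : String) == "--capture=no") = false) ∧
    ((("-m" : String) == "-q") = false) ∧ ((("-m" : String) == "-v") = false) ∧
    ((("-m" : String) == "-vv") = false) ∧ ((("-m" : String) == "-vvv") = false) ∧
    ((("slow" : String) == "-q") = false) ∧ ((("slow" : String) == "-v") = false) ∧
    ((("slow" : String) == "-vv") = false) ∧ ((("slow" : String) == "-vvv") = false) ∧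
    ((("-s" : String) == "-q") = false) ∧ ((("-s" : String) == "-v") = false) ∧
    ((("-s" : String) == "-vv") = false) ∧ ((("-s" : String) == "-vvv") = false) := by decide

-- ===== VERDICT (by name: the statement is the Claim_ definition above) =====
theorem build_pytest_args_spec : Claim_equal_build_pytest_args := by
  intro extra_args _
  unfold Spec_build_pytest_args build_pytest_args build_pytest_args_alt
  rw [pvFlags_eq]
  obtain ⟨l1,l2,l3,l4,l5,l6,l7,l8,l9,l10,l11,l12,l13,l14,l15,l16,l17,l18,l19,l20,l21,l22,l23,l24⟩ := pvLit1
  by_cases h1 : extra_args.any (fun a => a == "tests/e2e" || PySem.Str.endswith a ".py" || PySem.Str.isIn "::" a) <;>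
  by_cases h2 : extra_args.any (fun a => a == "-m") <;>
  by_cases h3 : extra_args.any (fun a => PySem.Str.startswith a "--markexpr") <;>
  by_cases h4 : extra_args.any (fun a => a == "-s") <;>
  by_cases h5 : extra_args.any (fun a => a == "--capture=no") <;>
  by_cases h6 : extra_args.any (fun a => a == "-q" || a == "-v" || a == "-vv" || a == "-vvv") <;>
    simp only [pvHasExplicitTarget, h1, h2, h3, h4, h5, h6, List.any_cons, List.any_append,
      List.any_nil, l1,l2,l3,l4,l5,l6,l7,l8,l9,l10,l11,l12,l13,l14,l15,l16,l17,l18,l19,l20,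
      l21,l22,l23,l24, Bool.or_false, Bool.or_true,
      Bool.not_true, Bool.not_false, Bool.and_true, Bool.and_false,
      Bool.and_self, Bool.false_eq_true, if_true, if_false,
      List.append_assoc, List.nil_append, List.cons_append]
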